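-- pv_equiv track=rewrite | github.com/joshfedo/splitflap-ha | custom_components/splitflap/text.py | process_escaped_chars
-- ===== SOURCE A (Python) =====
-- def process_escaped_chars(text: str) -> str:
--     """Process escaped characters and uppercase regular chars."""
--     result = ""
--     i = 0
--     while i < len(text):
--         if text[i] == "\\" and i + 1 < len(text):
--             result += text[i + 1].lower()  # Keep escaped char lowercase
--             i += 2
--         else:
--             result += text[i].upper()
--             i += 1
--     return result
-- ===== SOURCE B (Python) =====
-- def process_escaped_chars(text: str) -> str:
--     """Process escaped characters and uppercase regular chars."""
--     parts = text.split("\\")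
--     pieces = [parts[0].upper()]
--     i = 1
--     while i < len(parts):
--         p = parts[i]
--         if p:
--             # the backslash before this part escapes its first char
--             pieces.append(p[0].lower() + p[1:].upper())
--             i += 1
--         else:
--             # empty part: the backslash escapes another backslash (or is trailing)
--             pieces.append("\\")
--             i += 1
--             if i < len(parts):
--                 pieces.append(parts[i].upper())
--                 i += 1
--     return "".join(pieces)
-- ===== Notes on version B (the rewrite author's own statement) =====
-- stated objective: faster
-- what changed: Replaces the per-character while-loop (with manual index advancement, lookahead and quadratic string concatenation) by one split on backslashes followed by segment-wise processing: bulk str.upper per segment, lowercasing only the first char of each escaped segment, joined once at the end.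
import Mathlib
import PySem

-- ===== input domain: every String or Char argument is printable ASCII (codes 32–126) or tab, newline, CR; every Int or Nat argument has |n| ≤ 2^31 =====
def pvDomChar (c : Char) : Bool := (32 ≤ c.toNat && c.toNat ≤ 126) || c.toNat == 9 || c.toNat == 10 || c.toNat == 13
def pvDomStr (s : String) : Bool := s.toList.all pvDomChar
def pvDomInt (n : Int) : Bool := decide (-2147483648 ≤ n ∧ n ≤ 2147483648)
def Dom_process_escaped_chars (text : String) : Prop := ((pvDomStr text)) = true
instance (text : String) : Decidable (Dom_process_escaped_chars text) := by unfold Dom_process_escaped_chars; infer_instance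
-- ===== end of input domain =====

-- B replaces A's per-character while-loop (lookahead + repeated string concatenation) by one
-- split on backslashes and segment-wise processing, joined once (objective: faster, measured).

-- ===== PORT A =====
-- A's while-loop: consume two chars when text[i] is a backslash with a successor, else one char.
def pvAGo : List Char → List Char
  | [] => []
  | '\\' :: d :: rest => PySem.Chars.lowerChar d :: pvAGo rest
  | c :: rest => PySem.Chars.upperChar c :: pvAGo rest

def process_escaped_chars (text : String) : String :=
  String.mk (pvAGo text.toList)

-- ===== PORT B =====
-- B's while-loop over the split parts (index 1 onward): a nonempty part was escaped at its
-- first char; an empty part is an escaped (or trailing) backslash, consuming the next part plain.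
def pvBGo : List (List Char) → List (List Char)
  | [] => []
  | (c :: cs) :: rest => (PySem.Chars.lowerChar c :: PySem.Chars.upper cs) :: pvBGo rest
  | [] :: rest =>
      ['\\'] :: (match rest with
        | q :: rest' => PySem.Chars.upper q :: pvBGo rest'
        | [] => [])

def process_escaped_chars_alt (text : String) : String :=
  match text.toList.splitOn '\\' with
  | [] => ""  -- unreachable: splitOn never returns []
  | p0 :: rest => String.mk (PySem.Chars.join [] (PySem.Chars.upper p0 :: pvBGo rest))

-- ===== PRECONDITION & SPEC =====
def Spec_process_escaped_chars (text : String) (out : String) : Prop := out = process_escaped_chars_alt text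
instance (text : String) (out : String) : Decidable (Spec_process_escaped_chars text out) := by unfold Spec_process_escaped_chars; infer_instance

-- ===== CLAIM (what is proved, stated in full; the proofs are below) =====
def Claim_equal_process_escaped_chars : Prop := ∀ (text : String), Dom_process_escaped_chars text → Spec_process_escaped_chars text (process_escaped_chars text)

-- ===== LEMMAS AND PROOFS =====

-- B's result on a parts list, as a list of chars.
def pvG (parts : List (List Char)) : List Char :=
  match parts with
  | [] => []
  | p0 :: ps => PySem.Chars.upper p0 ++ (pvBGo ps).flatten

theorem pvBGo_cons_cons (c : Char) (cs : List Char) (rest : List (List Char)) :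
    pvBGo ((c :: cs) :: rest) = (PySem.Chars.lowerChar c :: PySem.Chars.upper cs) :: pvBGo rest := rfl

theorem pvBGo_nil_cons (q0 : List Char) (qs : List (List Char)) :
    pvBGo ([] :: q0 :: qs) = ['\\'] :: PySem.Chars.upper q0 :: pvBGo qs := rfl

theorem pvJoinNil (ls : List (List Char)) : PySem.Chars.join [] ls = ls.flatten := by
  induction ls with
  | nil => rfl
  | cons a t ih =>
    cases t with
    | nil => simp [PySem.Chars.join, List.intercalate]
    | cons b t' =>
      simp only [PySem.Chars.join, List.intercalate] at ih ⊢
      simp only [List.intersperse_cons₂, List.flatten_cons, List.nil_append, ih]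

theorem pvAGo_eq_pvG (cs : List Char) :
    pvAGo cs = pvG (cs.splitOnP (· == '\\')) := by
  induction cs using pvAGo.induct with
  | case1 => simp [pvAGo, pvG, pvBGo, PySem.Chars.upper]
  | case2 d rest ih =>
    obtain ⟨q0, qs, hq⟩ := List.exists_cons_of_ne_nil (List.splitOnP_ne_nil (· == '\\') rest)
    by_cases hd : d = '\\'
    · subst hd
      rw [pvAGo, List.splitOnP_cons, if_pos (by simp), List.splitOnP_cons, if_pos (by simp),
        hq, pvG, pvBGo_nil_cons, List.flatten_cons, ih, hq]
      simp [pvG, PySem.Chars.upper, show PySem.Chars.lowerChar '\\' = '\\' by decide]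
    · rw [pvAGo, List.splitOnP_cons, if_pos (by simp), List.splitOnP_cons,
        if_neg (by simp [hd]), hq, List.modifyHead_cons, pvG, pvBGo_cons_cons,
        List.flatten_cons, ih, hq]
      simp [pvG, PySem.Chars.upper]
  | case3 c rest hne ih =>
    by_cases hc : c = '\\'
    · subst hc
      cases rest with
      | nil => decide
      | cons d r => exact (hne d r rfl rfl).elim
    · obtain ⟨q0, qs, hq⟩ := List.exists_cons_of_ne_nil (List.splitOnP_ne_nil (· == '\\') rest)
      rw [pvAGo.eq_3 c rest (fun d r h _ => hc h), List.splitOnP_cons, if_neg (by simp [hc]),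
        hq, List.modifyHead_cons, ih, hq]
      simp [pvG, PySem.Chars.upper]

-- ===== VERDICT (by name: the statement is the Claim_ definition above) =====
theorem process_escaped_chars_spec : Claim_equal_process_escaped_chars := by
  intro text _
  unfold Spec_process_escaped_chars process_escaped_chars process_escaped_chars_alt
  obtain ⟨p0, ps, hp⟩ := List.exists_cons_of_ne_nil
    (List.splitOnP_ne_nil (· == '\\') text.toList)
  rw [pvAGo_eq_pvG, List.splitOn]
  rw [hp]
  simp [pvG, pvJoinNil]
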